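-- pv_equiv track=rewrite | github.com/Deepesh70/Unreal-MCP | agents/orchestrator.py | _pick_class_name
-- ===== SOURCE A (Python) =====
-- def _pick_class_name(preferred: str, generated_modules: list[str]) -> str:
--     if not generated_modules:
--         return preferred
--
--     actor_candidates = [m for m in generated_modules if m.lower().endswith("actor")]
--
--     if preferred:
--         pref = preferred.lower()
--         for module in generated_modules:
--             if module.lower() == pref:
--                 return module
--
--         # Flexible match: "CubeTower" should resolve to "CubeTowerActor".
--         for module in generated_modules:
--             m = module.lower()
--             if m.startswith(pref) or pref.startswith(m) or pref in m or m in pref: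
--                 return module
--
--         # Try common Actor naming variant.
--         for candidate in (f"{preferred}Actor", f"A{preferred}"):
--             cand = candidate.lower()
--             for module in generated_modules:
--                 if module.lower() == cand:
--                     return module
--
--     if actor_candidates:
--         return actor_candidates[0]
--     return generated_modules[0]
-- ===== SOURCE B (Python) =====
-- def _pick_class_name(preferred: str, generated_modules: list[str]) -> str:
--     # Single pass: track the best-priority match (0=exact, 1=flexible) and the
--     # first "...actor" fallback at once.  A's two extra scans for the
--     # f"{preferred}Actor" / f"A{preferred}" variants are dead code: any module
--     # equal to either variant already satisfies the flexible condition, so the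
--     # flexible scan returns first; B therefore omits those levels.
--     if not generated_modules:
--         return preferred
--
--     pref = preferred.lower()
--     best = None          # (priority, module); lower priority wins, first wins ties
--     first_actor = None
--     for module in generated_modules:
--         m = module.lower()
--         if first_actor is None and m.endswith("actor"):
--             first_actor = module
--         if preferred:
--             if m == pref:
--                 prio = 0
--             elif m.startswith(pref) or pref.startswith(m) or pref in m or m in pref:
--                 prio = 1
--             else:
--                 prio = None
--             if prio is not None and (best is None or prio < best[0]):
--                 best = (prio, module)
--
--     if best is not None:
--         return best[1]
--     if first_actor is not None:
--         return first_actor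
--     return generated_modules[0]
-- ===== Notes on version B (the rewrite author's own statement) =====
-- stated objective: simpler
-- what changed: Replaces A's four sequential early-return scans (plus an upfront actor-candidate filter) with a single pass that tracks the best match priority (0=exact, 1=flexible) and the first actor-suffixed fallback together; the two Actor-naming-variant scans are dropped as dead code since any variant match already satisfies the flexible condition.
import Mathlib
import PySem

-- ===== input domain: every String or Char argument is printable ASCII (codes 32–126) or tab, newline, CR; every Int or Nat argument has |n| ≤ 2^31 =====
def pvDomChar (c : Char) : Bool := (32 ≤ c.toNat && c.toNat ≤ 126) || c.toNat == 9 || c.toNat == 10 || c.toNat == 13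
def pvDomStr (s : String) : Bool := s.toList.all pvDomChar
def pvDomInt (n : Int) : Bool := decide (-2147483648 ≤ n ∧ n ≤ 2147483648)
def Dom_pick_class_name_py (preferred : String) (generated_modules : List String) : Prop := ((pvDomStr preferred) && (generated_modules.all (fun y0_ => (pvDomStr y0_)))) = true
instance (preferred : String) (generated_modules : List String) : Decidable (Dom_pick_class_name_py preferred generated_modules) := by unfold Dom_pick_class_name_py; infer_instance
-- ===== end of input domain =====

-- B replaces A's four sequential early-return scans with one pass that tracks the best
-- match priority (0 = exact, 1 = flexible) and the first actor-suffixed fallback together;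
-- A's two Actor-naming-variant scans are dead code (a variant match always satisfies the
-- flexible condition, so the flexible scan returns first) and B omits them.  Objective: simpler.

-- ===== PORT A =====
def pick_class_name_py (preferred : String) (generated_modules : List String) : String :=
  match generated_modules with
  | [] => preferred
  | g0 :: _ =>
    let actor_candidates := generated_modules.filter
      (fun m => PySem.Str.endswith (PySem.Str.lower m) "actor")
    let fallback : String :=
      match actor_candidates with
      | a :: _ => a
      | [] => g0
    if preferred == "" then fallback
    else
      let pref := PySem.Str.lower preferred
      match generated_modules.find? (fun module => PySem.Str.lower module == pref) with
      | some module => module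
      | none =>
        -- Flexible match: "CubeTower" should resolve to "CubeTowerActor".
        match generated_modules.find? (fun module =>
            PySem.Str.startswith (PySem.Str.lower module) pref ||
            PySem.Str.startswith pref (PySem.Str.lower module) ||
            PySem.Str.isIn pref (PySem.Str.lower module) ||
            PySem.Str.isIn (PySem.Str.lower module) pref) with
        | some module => module
        | none =>
          -- for candidate in (f"{preferred}Actor", f"A{preferred}"): inner loop unrolled
          match generated_modules.find? (fun module =>
              PySem.Str.lower module == PySem.Str.lower (preferred ++ "Actor")) with
          | some module => module
          | none =>
            match generated_modules.find? (fun module =>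
                PySem.Str.lower module == PySem.Str.lower ("A" ++ preferred)) with
            | some module => module
            | none => fallback

-- ===== PORT B =====
def altPrio (pref : String) (module : String) : Option Nat :=
  let m := PySem.Str.lower module
  if m == pref then some 0
  else if PySem.Str.startswith m pref || PySem.Str.startswith pref m ||
          PySem.Str.isIn pref m || PySem.Str.isIn m pref then some 1
  else none

def altLoop (hasPref : Bool) (pref : String)
    (best : Option (Nat × String)) (firstActor : Option String)
    (xs : List String) : Option (Nat × String) × Option String :=
  match xs with
  | [] => (best, firstActor)
  | module :: rest =>
    let m := PySem.Str.lower module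
    let firstActor' : Option String :=
      match firstActor with
      | some a => some a
      | none => if PySem.Str.endswith m "actor" then some module else none
    let best' : Option (Nat × String) :=
      if hasPref then
        match altPrio pref module with
        | none => best
        | some p =>
          match best with
          | none => some (p, module)
          | some (q, b) => if p < q then some (p, module) else some (q, b)
      else best
    altLoop hasPref pref best' firstActor' rest

def pick_class_name_py_alt (preferred : String) (generated_modules : List String) : String :=
  match generated_modules with
  | [] => preferred
  | g0 :: _ =>
    let pref := PySem.Str.lower preferred
    match altLoop (!(preferred == "")) pref none none generated_modules with
    | (some (_, module), _) => module
    | (none, some a) => a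
    | (none, none) => g0

-- ===== PRECONDITION & SPEC =====
def Spec_pick_class_name_py (preferred : String) (generated_modules : List String) (out : String) : Prop := out = pick_class_name_py_alt preferred generated_modules
instance (preferred : String) (generated_modules : List String) (out : String) : Decidable (Spec_pick_class_name_py preferred generated_modules out) := by unfold Spec_pick_class_name_py; infer_instance

-- ===== CLAIM (what is proved, stated in full; the proofs are below) =====
def Claim_equal_pick_class_name_py : Prop := ∀ (preferred : String) (generated_modules : List String), Dom_pick_class_name_py preferred generated_modules → Spec_pick_class_name_py preferred generated_modules (pick_class_name_py preferred generated_modules)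

-- ===== LEMMAS AND PROOFS =====

-- left-biased "first actor" combiner
def orE : Option String → Option String → Option String
  | some a, _ => some a
  | none, c => c

-- min-priority combiner, left-biased on ties
def mergeB : Option (Nat × String) → Option (Nat × String) → Option (Nat × String)
  | b, none => b
  | none, c => c
  | some (q, a), some (p, c) => if p < q then some (p, c) else some (q, a)

-- best (priority, module) over a list, first occurrence winning ties
def bestOf (pref : String) : List String → Option (Nat × String)
  | [] => none
  | x :: xs => mergeB ((altPrio pref x).map (fun p => (p, x))) (bestOf pref xs)

def actorP : String → Bool := fun m => PySem.Str.endswith (PySem.Str.lower m) "actor"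

def exactP (pref : String) : String → Bool := fun module => PySem.Str.lower module == pref

def flexP (pref : String) : String → Bool := fun module =>
  PySem.Str.startswith (PySem.Str.lower module) pref ||
  PySem.Str.startswith pref (PySem.Str.lower module) ||
  PySem.Str.isIn pref (PySem.Str.lower module) ||
  PySem.Str.isIn (PySem.Str.lower module) pref

theorem mergeB_none_left (c : Option (Nat × String)) : mergeB none c = c := by
  cases c with
  | none => rfl
  | some p => rcases p with ⟨q, a⟩; rfl

theorem mergeB_none_right (b : Option (Nat × String)) : mergeB b none = b := by
  cases b with
  | none => rfl
  | some p => rcases p with ⟨q, a⟩; rfl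

theorem orE_none_left (c : Option String) : orE none c = c := rfl

theorem orE_none_right (c : Option String) : orE c none = c := by
  cases c <;> rfl

theorem mergeB_assoc (a b c : Option (Nat × String)) :
    mergeB (mergeB a b) c = mergeB a (mergeB b c) := by
  rcases a with _ | ⟨qa, sa⟩ <;> rcases b with _ | ⟨qb, sb⟩ <;> rcases c with _ | ⟨qc, sc⟩ <;>
    try simp only [mergeB_none_left, mergeB_none_right]
  by_cases h1 : qb < qa <;> by_cases h2 : qc < qb <;> by_cases h3 : qc < qa <;>
    first
      | (exfalso; omega)
      | simp [mergeB, h1, h2, h3]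

theorem altLoop_spec (hp : Bool) (pref : String) :
    ∀ (xs : List String) (best : Option (Nat × String)) (fa : Option String),
      altLoop hp pref best fa xs =
        (mergeB best (if hp then bestOf pref xs else none),
         orE fa (xs.find? actorP)) := by
  intro xs
  induction xs with
  | nil =>
    intro best fa
    cases hp <;>
      simp only [altLoop, bestOf, List.find?_nil, orE_none_right, mergeB_none_right,
        Bool.false_eq_true, if_false, if_true]
  | cons x xs ih =>
    intro best fa
    simp only [altLoop]
    rw [ih]
    simp only [Prod.mk.injEq]
    constructor
    · -- best component
      cases hp with
      | false => simp only [Bool.false_eq_true, if_false, mergeB_none_right]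
      | true =>
        simp only [if_true]
        have hstep : (match altPrio pref x with
            | none => best
            | some p =>
              match best with
              | none => some (p, x)
              | some (q, b) => if p < q then some (p, x) else some (q, b)) =
            mergeB best ((altPrio pref x).map (fun p => (p, x))) := by
          rcases altPrio pref x with _ | p <;> rcases best with _ | ⟨q, b⟩ <;>
            simp [mergeB]
        rw [hstep, mergeB_assoc]
        rfl
    · -- firstActor component
      rcases fa with _ | a
      · show orE (if PySem.Str.endswith (PySem.Str.lower x) "actor" = true then some x
              else none) (List.find? actorP xs) = List.find? actorP (x :: xs)
        rw [List.find?_cons]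
        by_cases h : PySem.Str.endswith (PySem.Str.lower x) "actor" = true
        · have ha : actorP x = true := h
          rw [ha, if_pos h]
          rfl
        · have ha : actorP x = false := by
            cases hax : actorP x
            · rfl
            · exact absurd hax h
          rw [ha, if_neg h]
          rfl
      · rfl

theorem bestOf_eq (pref : String) (xs : List String) :
    bestOf pref xs =
      match xs.find? (exactP pref) with
      | some m => some (0, m)
      | none => (xs.find? (flexP pref)).map (fun m => (1, m)) := by
  induction xs with
  | nil => simp [bestOf]
  | cons x xs ih =>
    by_cases h0 : exactP pref x = true
    · have h0' := h0; simp only [exactP] at h0'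
      have hp : altPrio pref x = some 0 := by
        simp only [altPrio]
        rw [if_pos h0']
      have habs : ∀ r : Option (Nat × String), mergeB (some (0, x)) r = some (0, x) := by
        intro r; rcases r with _ | ⟨q, b⟩ <;> simp [mergeB]
      rw [bestOf, hp, List.find?_cons_of_pos h0]
      simp only [Option.map_some]
      exact habs _
    · by_cases h1 : flexP pref x = true
      · have h0' := h0; simp only [exactP] at h0'
        have h1' := h1; simp only [flexP] at h1'
        have hp : altPrio pref x = some 1 := by
          simp only [altPrio]
          rw [if_neg h0', if_pos h1']
        rw [bestOf, hp]
        simp only [Option.map_some]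
        rcases he : xs.find? (exactP pref) with _ | m
        · rw [ih, he, List.find?_cons_of_neg h0, he, List.find?_cons_of_pos h1]
          rcases hfx : xs.find? (flexP pref) with _ | m <;> simp [mergeB]
        · rw [ih, he, List.find?_cons_of_neg h0, he]
          simp [mergeB]
      · have h0' := h0; simp only [exactP] at h0'
        have h1' := h1; simp only [flexP] at h1'
        have hp : altPrio pref x = none := by
          simp only [altPrio]
          rw [if_neg h0', if_neg h1']
        rw [bestOf, hp]
        simp only [Option.map_none, mergeB_none_left]
        rw [ih, List.find?_cons_of_neg h0, List.find?_cons_of_neg h1]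

-- any module equal (lowercased) to preferred ++ "Actor" satisfies the flexible condition
theorem variantActor_flex (preferred module : String)
    (h : PySem.Str.lower module = PySem.Str.lower (preferred ++ "Actor")) :
    PySem.Str.startswith (PySem.Str.lower module) (PySem.Str.lower preferred) = true := by
  have hA : List.map PySem.Chars.lowerChar "Actor".toList = "actor".toList := by decide
  have hl : (PySem.Str.lower module).toList =
      (PySem.Str.lower preferred).toList ++ "actor".toList := by
    rw [h]
    simp only [PySem.Str.toList_lower, String.toList_append, PySem.Chars.lower,
      List.map_append, hA]
  rw [PySem.Str.startswith_eq, hl]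
  exact (PySem.Chars.startswith_iff _ _).2 (List.prefix_append _ _)

-- any module equal (lowercased) to "A" ++ preferred satisfies the flexible condition
theorem variantA_flex (preferred module : String)
    (h : PySem.Str.lower module = PySem.Str.lower ("A" ++ preferred)) :
    PySem.Str.isIn (PySem.Str.lower preferred) (PySem.Str.lower module) = true := by
  have hA : List.map PySem.Chars.lowerChar "A".toList = ['a'] := by decide
  have hl : (PySem.Str.lower module).toList =
      'a' :: (PySem.Str.lower preferred).toList := by
    rw [h]
    simp only [PySem.Str.toList_lower, String.toList_append, PySem.Chars.lower,
      List.map_append, hA, List.singleton_append]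
  rw [PySem.Str.isIn_eq, hl]
  exact (PySem.Chars.isIn_iff_infix _ _).2 (List.suffix_cons _ _).isInfix

theorem filter_empty_of_find?_none {α : Type} {p : α → Bool} {xs : List α}
    (h : xs.find? p = none) : xs.filter p = [] := by
  have hh := List.head?_filter (p := p) (l := xs)
  rw [h] at hh
  exact List.head?_eq_none_iff.1 hh

theorem filter_cons_of_find?_some {α : Type} {p : α → Bool} {xs : List α} {a : α}
    (h : xs.find? p = some a) : ∃ t, xs.filter p = a :: t := by
  have hh : (xs.filter p).head? = some a := by rw [List.head?_filter, h]
  exact List.head?_eq_some_iff.1 hh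

-- ===== VERDICT (by name: the statement is the Claim_ definition above) =====
theorem pick_class_name_py_spec : Claim_equal_pick_class_name_py := by
  intro preferred generated_modules _
  unfold Spec_pick_class_name_py
  cases generated_modules with
  | nil => rfl
  | cons g0 gs =>
    simp only [pick_class_name_py, pick_class_name_py_alt]
    rw [altLoop_spec, mergeB_none_left, orE_none_left]
    cases hbe : (preferred == "" : Bool) with
    | true =>
      simp only [Bool.not_true, Bool.false_eq_true, if_false, if_true]
      rcases hfa : (g0 :: gs).find? actorP with _ | a
      · have hfa' : (g0 :: gs).find?
            (fun m => PySem.Str.endswith (PySem.Str.lower m) "actor") = none := hfa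
        rw [filter_empty_of_find?_none hfa']
      · have hfa' : (g0 :: gs).find?
            (fun m => PySem.Str.endswith (PySem.Str.lower m) "actor") = some a := hfa
        rcases filter_cons_of_find?_some hfa' with ⟨t, ht⟩
        rw [ht]
    | false =>
      simp only [Bool.not_false, Bool.false_eq_true, if_false, if_true]
      rw [bestOf_eq]
      rcases he : (g0 :: gs).find? (exactP (PySem.Str.lower preferred)) with _ | m
      · have he' : (g0 :: gs).find?
            (fun module => PySem.Str.lower module == PySem.Str.lower preferred) = none := he
        rcases hf : (g0 :: gs).find? (flexP (PySem.Str.lower preferred)) with _ | m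
        · have hf' : (g0 :: gs).find? (fun module =>
              PySem.Str.startswith (PySem.Str.lower module) (PySem.Str.lower preferred) ||
              PySem.Str.startswith (PySem.Str.lower preferred) (PySem.Str.lower module) ||
              PySem.Str.isIn (PySem.Str.lower preferred) (PySem.Str.lower module) ||
              PySem.Str.isIn (PySem.Str.lower module) (PySem.Str.lower preferred)) = none := hf
          -- no exact and no flexible match: A's variant scans necessarily find nothing
          have hflex := List.find?_eq_none.1 hf'
          have hv1 : (g0 :: gs).find? (fun module =>
              PySem.Str.lower module == PySem.Str.lower (preferred ++ "Actor")) = none := by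
            rw [List.find?_eq_none]
            intro m hm hbeq
            have heq : PySem.Str.lower m = PySem.Str.lower (preferred ++ "Actor") :=
              beq_iff_eq.1 hbeq
            have hfm := hflex m hm
            simp only [Bool.or_eq_true, not_or] at hfm
            exact hfm.1.1.1 (variantActor_flex preferred m heq)
          have hv2 : (g0 :: gs).find? (fun module =>
              PySem.Str.lower module == PySem.Str.lower ("A" ++ preferred)) = none := by
            rw [List.find?_eq_none]
            intro m hm hbeq
            have heq : PySem.Str.lower m = PySem.Str.lower ("A" ++ preferred) :=
              beq_iff_eq.1 hbeq
            have hfm := hflex m hm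
            simp only [Bool.or_eq_true, not_or] at hfm
            exact hfm.1.2 (variantA_flex preferred m heq)
          rw [he', hf', hv1, hv2]
          simp only [Option.map_none]
          rcases hfa : (g0 :: gs).find? actorP with _ | a
          · have hfa' : (g0 :: gs).find?
                (fun m => PySem.Str.endswith (PySem.Str.lower m) "actor") = none := hfa
            rw [filter_empty_of_find?_none hfa']
          · have hfa' : (g0 :: gs).find?
                (fun m => PySem.Str.endswith (PySem.Str.lower m) "actor") = some a := hfa
            rcases filter_cons_of_find?_some hfa' with ⟨t, ht⟩
            rw [ht]
        · have hf' : (g0 :: gs).find? (fun module =>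
              PySem.Str.startswith (PySem.Str.lower module) (PySem.Str.lower preferred) ||
              PySem.Str.startswith (PySem.Str.lower preferred) (PySem.Str.lower module) ||
              PySem.Str.isIn (PySem.Str.lower preferred) (PySem.Str.lower module) ||
              PySem.Str.isIn (PySem.Str.lower module) (PySem.Str.lower preferred)) = some m := hf
          rw [he', hf']
          rfl
      · have he' : (g0 :: gs).find?
            (fun module => PySem.Str.lower module == PySem.Str.lower preferred) = some m := he
        rw [he']
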